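-- pv_equiv track=rewrite | github.com/loukwets/Classification-using-neural-networks | partie2-loukwets-master/sol_partie1.py | predict
-- ===== SOURCE A (Python) =====
-- def predict(x,L):
--     best_prediction = None
--     value_prediction = None
--     for d in range(10):
--         # computing prediction value for digit d
--         res = sum(L[d][i]*x[i] for i in range(len(L[d])))
--         if value_prediction==None or res > value_prediction:
--             value_prediction = res
--             best_prediction = d
--     return best_prediction
-- ===== SOURCE B (Python) =====
-- def predict(x, L):
--     # Tournament (divide-and-conquer) argmax over the digit range 0..9;
--     # on a tie the left half wins, so the first maximal digit survives.
--     def best(lo, hi):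
--         # winner (digit, score) of the range [lo, hi)
--         if hi - lo <= 1:
--             return lo, sum(a * b for a, b in zip(L[lo], x))
--         mid = (lo + hi) // 2
--         dl, sl = best(lo, mid)
--         dr, sr = best(mid, hi)
--         return (dl, sl) if sl >= sr else (dr, sr)
--     return best(0, 10)[0]
-- ===== Notes on version B (the rewrite author's own statement) =====
-- stated objective: alternative
-- what changed: Replaces A's sequential running-best loop over digits 0..9 by a recursive divide-and-conquer tournament: each half of the digit range elects its winning (digit, score) pair and the two winners are combined with a left-wins-ties comparison, and the per-digit score is a zip-based dot product instead of index arithmetic.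
import Mathlib
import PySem

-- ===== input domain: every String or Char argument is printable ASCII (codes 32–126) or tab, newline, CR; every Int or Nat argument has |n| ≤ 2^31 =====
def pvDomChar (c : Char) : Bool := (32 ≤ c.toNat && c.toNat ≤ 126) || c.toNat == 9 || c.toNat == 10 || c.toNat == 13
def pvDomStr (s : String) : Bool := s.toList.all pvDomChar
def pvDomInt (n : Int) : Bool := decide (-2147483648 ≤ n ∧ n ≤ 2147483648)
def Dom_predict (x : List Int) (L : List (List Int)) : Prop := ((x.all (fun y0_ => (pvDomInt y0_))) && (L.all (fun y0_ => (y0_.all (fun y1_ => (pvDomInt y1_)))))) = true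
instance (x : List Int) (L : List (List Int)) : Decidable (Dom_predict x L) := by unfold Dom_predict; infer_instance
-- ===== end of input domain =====

-- B replaces A's running-best loop by a recursive divide-and-conquer tournament over the digit
-- range with a left-wins-ties combine and a zip-based dot product (alternative decomposition, same cost).


-- ===== PORT A =====
-- A-side helper: res = sum(L[d][i]*x[i] for i in range(len(L[d]))); pyGetD is exact here
-- because inside Pre_ every index is in range (Python raises out of range, excluded by Pre_).
def predictScore (x : List Int) (row : List Int) : Int :=
  (PySem.List.pyRange 0 (row.length : Int) 1).foldl
    (fun s i => s + PySem.List.pyGetD row i 0 * PySem.List.pyGetD x i 0) 0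

def predict (x : List Int) (L : List (List Int)) : Int :=
  -- for d in range(10): running (best_prediction, value_prediction), both starting as None
  let st := (PySem.List.pyRange 0 10 1).foldl
    (fun (st : Option Int × Option Int) d =>
      let res := predictScore x (PySem.List.pyGetD L d [])
      match st.2 with
      | none => (some d, some res)
      | some v => if res > v then (some d, some res) else st)
    (none, none)
  st.1.getD 0

-- ===== PORT B =====
-- B-side helper: sum(a * b for a, b in zip(L[lo], x))
def altScore (x row : List Int) : Int :=
  ((row.zip x).map (fun p => p.1 * p.2)).sum

-- B's recursive tournament best(lo, hi): winner (digit, score) of the digit range [lo, hi).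
-- The Nat argument is FUEL, a totality guard only: it bounds the recursion depth and is never
-- exhausted on the calls predict_alt makes (fuel starts at 10 ≥ hi - lo and each half is smaller).
def altBest (x : List Int) (L : List (List Int)) : Nat → Int → Int → Int × Int
  | 0, lo, _ => (lo, altScore x (PySem.List.pyGetD L lo []))
  | fuel + 1, lo, hi =>
    if hi - lo ≤ 1 then (lo, altScore x (PySem.List.pyGetD L lo []))
    else
      let mid := PySem.Int.floordiv (lo + hi) 2
      let l := altBest x L fuel lo mid
      let r := altBest x L fuel mid hi
      if l.2 ≥ r.2 then l else r

def predict_alt (x : List Int) (L : List (List Int)) : Int :=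
  (altBest x L 10 0 10).1

-- ===== PRECONDITION & SPEC =====
-- Pre_ excludes exactly the inputs on which A raises IndexError: fewer than 10 rows in L,
-- or one of the first 10 rows longer than x (then x[i] is out of range).
def Pre_predict (x : List Int) (L : List (List Int)) : Prop :=
  10 ≤ L.length ∧ ∀ row ∈ L.take 10, row.length ≤ x.length
instance (x : List Int) (L : List (List Int)) : Decidable (Pre_predict x L) := by
  unfold Pre_predict; infer_instance

def pvWitness_predict : List Int × List (List Int) :=
  ([1], [[1], [2], [], [0], [1], [], [], [], [], [-3]])


def Spec_predict (x : List Int) (L : List (List Int)) (out : Int) : Prop := out = predict_alt x L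
instance (x : List Int) (L : List (List Int)) (out : Int) : Decidable (Spec_predict x L out) := by
  unfold Spec_predict; infer_instance

-- ===== CLAIM (what is proved, stated in full; the proofs are below) =====
def Claim_equal_predict : Prop := ∀ (x : List Int) (L : List (List Int)), Dom_predict x L → Pre_predict x L → Spec_predict x L (predict x L)

-- ===== LEMMAS AND PROOFS =====

-- the tournament's combine: left wins ties
def comb (p q : Int × Int) : Int × Int := if p.2 ≥ q.2 then p else q

theorem comb_assoc (a b c : Int × Int) : comb (comb a b) c = comb a (comb b c) := by
  unfold comb; split_ifs <;> first | rfl | omega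

-- comb commutes out of a left fold whose step is comb
theorem foldl_comb (g : Int → Int) (l : List Int) :
    ∀ s t, l.foldl (fun st d => comb st (d, g d)) (comb s t)
      = comb s (l.foldl (fun st d => comb st (d, g d)) t) := by
  induction l with
  | nil => intro s t; rfl
  | cons c l ih =>
    intro s t
    simp only [List.foldl_cons]
    rw [comb_assoc]
    exact ih s (comb t (c, g c))

-- the tournament over [lo, hi) IS the left fold of comb seeded with digit lo (fuel suffices)
theorem altBest_eq (x : List Int) (L : List (List Int)) :
    ∀ (fuel : Nat) (lo hi : Int), 1 ≤ hi - lo → hi - lo ≤ (fuel : Int) →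
      altBest x L fuel lo hi
        = (PySem.List.pyRange (lo + 1) hi 1).foldl
            (fun st d => comb st (d, altScore x (PySem.List.pyGetD L d [])))
            (lo, altScore x (PySem.List.pyGetD L lo [])) := by
  intro fuel
  induction fuel with
  | zero => intro lo hi h1 h2; omega
  | succ m ih =>
    intro lo hi h1 h2
    by_cases hb : hi - lo ≤ 1
    · rw [altBest, if_pos hb, PySem.List.pyRange_one_eq_nil (by omega : hi ≤ lo + 1)]
      rfl
    · rw [altBest, if_neg hb]
      have hmid : PySem.Int.floordiv (lo + hi) 2 = (lo + hi) / 2 :=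
        PySem.Int.floordiv_eq_ediv_of_pos (by norm_num)
      have hlm : lo < PySem.Int.floordiv (lo + hi) 2 := by rw [hmid]; omega
      have hmh : PySem.Int.floordiv (lo + hi) 2 < hi := by rw [hmid]; omega
      generalize hm : PySem.Int.floordiv (lo + hi) 2 = mid at *
      have e1 := ih lo mid (by omega) (by omega)
      have e2 := ih mid hi (by omega) (by omega)
      have hsplit : PySem.List.pyRange (lo + 1) hi 1
          = PySem.List.pyRange (lo + 1) mid 1 ++ mid :: PySem.List.pyRange (mid + 1) hi 1 := by
        rw [PySem.List.pyRange_one_append (lo + 1) mid hi (by omega) (by omega),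
            PySem.List.pyRange_one_cons hmh]
      rw [hsplit, List.foldl_append, List.foldl_cons, ← e1, foldl_comb, ← e2]
      rfl

-- A's if-step is the comb step
theorem stepA_eq (f : Int → Int) :
    (fun (st : Int × Int) d => if f d > st.2 then (d, f d) else st)
      = (fun st d => comb st (d, f d)) := by
  funext st d; unfold comb; split_ifs <;> first | rfl | omega

-- A's option-seeded fold, once the seed is some, is the plain pair fold
theorem foldOpt_eq (f : Int → Int) (l : List Int) :
    ∀ (j v : Int),
      (l.foldl (fun (st : Option Int × Option Int) d =>
          let res := f d
          match st.2 with
          | none => (some d, some res)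
          | some v => if res > v then (some d, some res) else st)
        (some j, some v))
      = (fun (p : Int × Int) => (some p.1, some p.2))
          (l.foldl (fun (st : Int × Int) d => if f d > st.2 then (d, f d) else st) (j, v)) := by
  induction l with
  | nil => intro j v; rfl
  | cons c t ih =>
    intro j v
    simp only [List.foldl_cons]
    by_cases h : f c > v
    · simp only [if_pos h]; exact ih c (f c)
    · simp only [if_neg h]; exact ih j v

-- A unrolled: the first iteration seeds the accumulators, the rest is the comb fold
theorem predictA (x : List Int) (L : List (List Int)) :
    predict x L =
      ((PySem.List.pyRange 1 10).foldl
        (fun st d => comb st (d, predictScore x (PySem.List.pyGetD L d [])))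
        (0, predictScore x (PySem.List.pyGetD L 0 []))).1 := by
  have h1 : predict x L = ((PySem.List.pyRange 1 10).foldl
      (fun (st : Option Int × Option Int) d =>
        let res := predictScore x (PySem.List.pyGetD L d [])
        match st.2 with
        | none => (some d, some res)
        | some v => if res > v then (some d, some res) else st)
      (some (0:Int), some (predictScore x (PySem.List.pyGetD L 0 [])))).1.getD 0 := by
    unfold predict
    rw [PySem.List.pyRange_one_cons (by norm_num : (0:Int) < 10)]
    rfl
  rw [h1, foldOpt_eq (fun d => predictScore x (PySem.List.pyGetD L d []))]
  rw [stepA_eq (fun d => predictScore x (PySem.List.pyGetD L d []))]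
  rfl

-- A's index-arithmetic dot product as a plain sum over positions
theorem predictScore_eq_sum (x row : List Int) :
    predictScore x row
      = ((List.range row.length).map (fun k => row.getD k 0 * x.getD k 0)).sum := by
  unfold predictScore
  rw [PySem.List.foldl_add, PySem.List.pyRange_one]
  simp [List.map_map, Function.comp_def, PySem.List.pyGetD_natCast]

-- under Pre_'s length bound, A's dot product = B's zip dot product
theorem score_eq : ∀ (row x : List Int), row.length ≤ x.length →
    predictScore x row = altScore x row := by
  intro row
  induction row with
  | nil => intro x _; rfl
  | cons a r ih =>
    intro x hx
    cases x with
    | nil => simp at hx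
    | cons b xs =>
      rw [predictScore_eq_sum]
      simp only [List.length_cons, List.range_succ_eq_map, List.map_cons, List.map_map,
        Function.comp_def, List.getD_cons_zero, List.getD_cons_succ, List.sum_cons]
      rw [← predictScore_eq_sum xs r, ih xs (by simpa using hx)]
      simp [altScore]

-- pyGetD L d [] for 0 ≤ d < 10 ≤ len L lands in L.take 10
theorem row_mem_take (L : List (List Int)) (d : Int) (h0 : 0 ≤ d) (h1 : d < 10)
    (hL : 10 ≤ L.length) : PySem.List.pyGetD L d [] ∈ L.take 10 := by
  rw [PySem.List.pyGetD_of_nonneg L [] h0, List.getD_eq_getElem L [] (by omega)]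
  have : (L.take 10)[d.toNat]'(by simp; omega) = L[d.toNat]'(by omega) := List.getElem_take
  rw [← this]; exact List.getElem_mem _

-- ===== VERDICT (by name: the statements are the Claim_ definitions above) =====
set_option maxHeartbeats 1600000 in
theorem predict_spec : Claim_equal_predict := by
  intro x L _hdom hpre
  unfold Spec_predict predict_alt
  rw [predictA, altBest_eq x L 10 0 10 (by norm_num) (by norm_num)]
  have hseed : predictScore x (PySem.List.pyGetD L 0 []) = altScore x (PySem.List.pyGetD L 0 []) :=
    score_eq _ x (hpre.2 _ (row_mem_take L 0 (by norm_num) (by norm_num) hpre.1))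
  rw [show (0:Int) + 1 = 1 by norm_num, hseed]
  congr 1
  apply PySem.List.foldl_congr_mem
  intro acc d hd
  have hdb := PySem.List.mem_pyRange_one.mp hd
  rw [score_eq _ x (hpre.2 _ (row_mem_take L d (by omega) (by omega) hpre.1))]
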